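-- pv_equiv track=rewrite | github.com/ROCarrera/F1Trends | dashboard/services/legends.py | parse_era
-- ===== SOURCE A (Python) =====
-- ERA_CHOICES: tuple[tuple[str, str], ...] = (
--     ("all", "All Eras"),
--     ("1950-1979", "1950-1979"),
--     ("1980-1999", "1980-1999"),
--     ("2000-2013", "2000-2013"),
--     ("2014-2021", "2014-2021"),
--     ("2022-2026", "2022-2026"),
-- )
--
-- def parse_era(era_str: str | None) -> tuple[int | None, int | None, str]:
--     era_value = (era_str or "all").strip()
--     if era_value == "all":
--         return None, None, "All Eras"
--
--     allowed = {value for value, _ in ERA_CHOICES}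
--     if era_value not in allowed:
--         return None, None, "All Eras"
--
--     start_str, end_str = era_value.split("-")
--     return int(start_str), int(end_str), era_value
-- ===== SOURCE B (Python) =====
-- ERA_CHOICES: tuple[tuple[str, str], ...] = (
--     ("all", "All Eras"),
--     ("1950-1979", "1950-1979"),
--     ("1980-1999", "1980-1999"),
--     ("2000-2013", "2000-2013"),
--     ("2014-2021", "2014-2021"),
--     ("2022-2026", "2022-2026"),
-- )
--
-- _DEFAULT = (None, None, "All Eras")
--
-- _LOOKUP = {}
-- for _value, _label in ERA_CHOICES:
--     if _value == "all":
--         _LOOKUP[_value] = _DEFAULT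
--     else:
--         _s, _e = _value.split("-")
--         _LOOKUP[_value] = (int(_s), int(_e), _value)
--
-- def parse_era(era_str):
--     return _LOOKUP.get((era_str or "all").strip(), _DEFAULT)
-- ===== Notes on version B (the rewrite author's own statement) =====
-- stated objective: simpler
-- what changed: Replaces the validate-then-branch-then-parse control flow (set build, membership test, split, int-parse per call) with a lookup table precomputed once from ERA_CHOICES, so parse_era is a single dict.get with a default.
import Mathlib
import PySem

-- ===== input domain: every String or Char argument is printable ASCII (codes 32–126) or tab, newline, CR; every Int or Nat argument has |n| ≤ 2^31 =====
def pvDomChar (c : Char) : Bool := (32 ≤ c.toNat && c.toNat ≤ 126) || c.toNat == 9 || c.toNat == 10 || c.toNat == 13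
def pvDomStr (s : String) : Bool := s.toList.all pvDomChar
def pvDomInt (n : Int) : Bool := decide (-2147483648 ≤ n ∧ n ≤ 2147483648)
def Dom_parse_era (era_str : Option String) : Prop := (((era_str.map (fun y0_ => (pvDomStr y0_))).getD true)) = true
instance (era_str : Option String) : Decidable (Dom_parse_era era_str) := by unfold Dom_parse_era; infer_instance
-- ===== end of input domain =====

-- B replaces A's validate/branch/split control flow with a single lookup in a table precomputed from ERA_CHOICES (simpler per-call logic).


-- ===== PORT A =====
def eraChoices : List (String × String) :=
  [("all", "All Eras"), ("1950-1979", "1950-1979"), ("1980-1999", "1980-1999"),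
   ("2000-2013", "2000-2013"), ("2014-2021", "2014-2021"), ("2022-2026", "2022-2026")]

def parse_era (era_str : Option String) : Option Int × Option Int × String :=
  -- era_value = (era_str or "all").strip()
  let era_value := PySem.Str.strip (match era_str with
    | some s => if s = "" then "all" else s   -- '' is falsy in Python
    | none => "all")
  if era_value = "all" then (none, none, "All Eras")
  else
    let allowed : PySem.Set String := PySem.Set.ofList (eraChoices.map (·.1))
    if era_value ∉ allowed then (none, none, "All Eras")
    else
      match PySem.Str.split? era_value "-" with
      | some [a, b] =>
        match PySem.Int.ofStr? a, PySem.Int.ofStr? b with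
        | some x, some y => (some x, some y, era_value)
        | _, _ => (none, none, "All Eras")  -- unreachable: allowed keys parse
      | _ => (none, none, "All Eras")       -- unreachable: allowed keys have exactly one '-'

-- ===== PORT B =====
def eraDefault : Option Int × Option Int × String := (none, none, "All Eras")

def eraLookup : PySem.Dict String (Option Int × Option Int × String) :=
  -- table built once by iterating ERA_CHOICES (B inlines the same literal tuple A's module defines)
  [("all", "All Eras"), ("1950-1979", "1950-1979"), ("1980-1999", "1980-1999"),
   ("2000-2013", "2000-2013"), ("2014-2021", "2014-2021"),
   ("2022-2026", "2022-2026")].foldl (fun d p =>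
    if p.1 = "all" then d.insert p.1 eraDefault
    else
      -- s, e = value.split("-"); table[value] = (int(s), int(e), value)
      let parts := (PySem.Str.split? p.1 "-").getD []   -- sep "-" ≠ "": split? is never none
      ((PySem.Int.ofStr? (parts.getD 0 "")).bind fun x =>
        (PySem.Int.ofStr? (parts.getD 1 "")).map fun y =>
          d.insert p.1 (some x, some y, p.1)).getD d    -- int() cannot fail on these literal keys
    ) PySem.Dict.empty

def parse_era_alt (era_str : Option String) : Option Int × Option Int × String :=
  let raw := era_str.getD "all"          -- era_str or "all": None and '' are falsy
  eraLookup.getD (PySem.Str.strip (if raw = "" then "all" else raw)) eraDefault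

-- ===== PRECONDITION & SPEC =====
def Spec_parse_era (era_str : Option String) (out : Option Int × Option Int × String) : Prop := out = parse_era_alt era_str
instance (era_str : Option String) (out : Option Int × Option Int × String) : Decidable (Spec_parse_era era_str out) := by unfold Spec_parse_era; infer_instance

-- ===== CLAIM (what is proved, stated in full; the proofs are below) =====
def Claim_equal_parse_era : Prop := ∀ (era_str : Option String), Dom_parse_era era_str → Spec_parse_era era_str (parse_era era_str)

-- ===== LEMMAS AND PROOFS =====
theorem core_eq (v : String) :
    (if v = "all" then ((none, none, "All Eras") : Option Int × Option Int × String)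
     else
       let allowed : PySem.Set String := PySem.Set.ofList (eraChoices.map (·.1))
       if v ∉ allowed then (none, none, "All Eras")
       else
         match PySem.Str.split? v "-" with
         | some [a, b] =>
           match PySem.Int.ofStr? a, PySem.Int.ofStr? b with
           | some x, some y => (some x, some y, v)
           | _, _ => (none, none, "All Eras")
         | _ => (none, none, "All Eras"))
    = eraLookup.getD v eraDefault := by
  by_cases h0 : v = "all"; · subst h0; decide
  by_cases h1 : v = "1950-1979"; · subst h1; decide
  by_cases h2 : v = "1980-1999"; · subst h2; decide
  by_cases h3 : v = "2000-2013"; · subst h3; decide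
  by_cases h4 : v = "2014-2021"; · subst h4; decide
  by_cases h5 : v = "2022-2026"; · subst h5; decide
  -- v is none of the keys: both sides are the default
  have hmem : v ∉ PySem.Set.ofList (eraChoices.map (·.1)) := by
    simp [PySem.Set.mem_ofList, eraChoices, h0, h1, h2, h3, h4, h5]
  have htab : eraLookup = PySem.Dict.mk
      [("all", eraDefault),
       ("1950-1979", (some 1950, some 1979, "1950-1979")),
       ("1980-1999", (some 1980, some 1999, "1980-1999")),
       ("2000-2013", (some 2000, some 2013, "2000-2013")),
       ("2014-2021", (some 2014, some 2021, "2014-2021")),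
       ("2022-2026", (some 2022, some 2026, "2022-2026"))] := by decide
  rw [htab]
  simp [PySem.Dict.getD_eq_get?_getD, PySem.Dict.get?, hmem, eraDefault,
        Ne.symm h0, Ne.symm h1, Ne.symm h2, Ne.symm h3, Ne.symm h4, Ne.symm h5]

-- ===== VERDICT (by name: the statement is the Claim_ definition above) =====
theorem parse_era_spec : Claim_equal_parse_era := by
  intro era_str _
  unfold Spec_parse_era parse_era parse_era_alt
  cases era_str with
  | none => exact core_eq _
  | some s => exact core_eq _
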